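-- pv_equiv track=rewrite | github.com/Phantasm0009/ShadowAudit | backend/app/services/typosquat_detector.py | _is_single_transposition
-- ===== SOURCE A (Python) =====
-- def _is_single_transposition(left: str, right: str) -> bool:
--     if len(left) != len(right) or len(left) < 2:
--         return False
--
--     differences = [index for index, (a_char, b_char) in enumerate(zip(left, right)) if a_char != b_char]
--     if len(differences) != 2:
--         return False
--
--     first, second = differences
--     return second == first + 1 and left[first] == right[second] and left[second] == right[first]
-- ===== SOURCE B (Python) =====
-- def _is_single_transposition(left: str, right: str) -> bool:
--     if len(left) != len(right) or len(left) < 2: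
--         return False
--     for i in range(len(left) - 1):
--         if left[i] != right[i]:
--             return (left[i] == right[i + 1]
--                     and left[i + 1] == right[i]
--                     and left[i + 2:] == right[i + 2:])
--     return False
-- ===== Notes on version B (the rewrite author's own statement) =====
-- stated objective: alternative
-- what changed: Replaces the collect-all-differing-indices comprehension with an early-exit scan to the first mismatch followed by a swap check and a single tail-slice comparison.
import Mathlib
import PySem

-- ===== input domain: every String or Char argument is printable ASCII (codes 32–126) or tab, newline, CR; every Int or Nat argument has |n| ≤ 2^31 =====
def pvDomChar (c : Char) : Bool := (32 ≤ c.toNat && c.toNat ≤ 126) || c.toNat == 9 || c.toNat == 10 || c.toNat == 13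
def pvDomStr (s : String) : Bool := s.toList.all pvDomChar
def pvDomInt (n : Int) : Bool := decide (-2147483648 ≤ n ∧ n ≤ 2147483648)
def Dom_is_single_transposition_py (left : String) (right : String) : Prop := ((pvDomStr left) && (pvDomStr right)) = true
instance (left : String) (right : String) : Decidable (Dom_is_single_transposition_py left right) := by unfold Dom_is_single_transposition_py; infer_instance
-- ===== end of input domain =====

-- B replaces A's collect-all-differing-indices pass by an early-exit scan to the
-- first mismatch plus a swap check and one tail-slice comparison (objective: alternative).

-- ===== PORT A =====
-- the list comprehension over enumerate(zip(left, right)); left[first] etc. via pyGet?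
def pvCoreA (L R : List Char) : Bool :=
  let differences :=
    ((PySem.List.enumerate (L.zip R)).filter (fun p => p.2.1 ≠ p.2.2)).map (·.1)
  match differences with
  | [first, second] =>
      decide (second = first + 1)
        && (PySem.List.pyGet? L first == PySem.List.pyGet? R second)
        && (PySem.List.pyGet? L second == PySem.List.pyGet? R first)
  | _ => false

def is_single_transposition_py (left : String) (right : String) : Bool :=
  let L := left.toList
  let R := right.toList
  if L.length ≠ R.length ∨ L.length < 2 then false
  else pvCoreA L R

-- ===== PORT B =====
-- the for-loop over range(len(left)-1): advance while chars agree, at the first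
-- mismatch return the swap check and the tail-slice equality; no mismatch → False
def pvScanB : List Char → List Char → Bool
  | a :: a2 :: as', b :: b2 :: bs' =>
      if a ≠ b then a == b2 && a2 == b && decide ((a2 :: as').tail = (b2 :: bs').tail)
      else pvScanB (a2 :: as') (b2 :: bs')
  | _, _ => false

def is_single_transposition_py_alt (left : String) (right : String) : Bool :=
  let L := left.toList
  let R := right.toList
  if L.length ≠ R.length ∨ L.length < 2 then false
  else pvScanB L R

-- ===== PRECONDITION & SPEC =====
def Spec_is_single_transposition_py (left : String) (right : String) (out : Bool) : Prop := out = is_single_transposition_py_alt left right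
instance (left : String) (right : String) (out : Bool) : Decidable (Spec_is_single_transposition_py left right out) := by unfold Spec_is_single_transposition_py; infer_instance

-- ===== CLAIM (what is proved, stated in full; the proofs are below) =====
def Claim_equal_is_single_transposition_py : Prop := ∀ (left : String) (right : String), Dom_is_single_transposition_py left right → Spec_is_single_transposition_py left right (is_single_transposition_py left right)

-- ===== LEMMAS AND PROOFS =====

def pvDiffs (L R : List Char) (s : Int) : List Int :=
  ((PySem.List.enumerate (L.zip R) s).filter (fun p => p.2.1 ≠ p.2.2)).map (·.1)

theorem pvDiffs_nil (R : List Char) (s : Int) : pvDiffs [] R s = [] := by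
  simp [pvDiffs, PySem.List.enumerate_nil]

theorem pvDiffs_nil' (L : List Char) (s : Int) : pvDiffs L [] s = [] := by
  simp [pvDiffs, PySem.List.enumerate_nil]

theorem pvDiffs_cons (a b : Char) (L R : List Char) (s : Int) :
    pvDiffs (a :: L) (b :: R) s =
      (if a ≠ b then [s] else []) ++ pvDiffs L R (s + 1) := by
  simp only [pvDiffs, List.zip_cons_cons, PySem.List.enumerate_cons, List.filter_cons]
  by_cases h : a = b <;> simp [h]

theorem pvDiffs_nonneg (L : List Char) (R : List Char) (s : Int) (hs : 0 ≤ s) :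
    ∀ j ∈ pvDiffs L R s, s ≤ j := by
  induction L generalizing R s with
  | nil => simp [pvDiffs_nil]
  | cons a L ih =>
    cases R with
    | nil => simp [pvDiffs_nil']
    | cons b R =>
      intro j hj
      rw [pvDiffs_cons] at hj
      rcases List.mem_append.mp hj with h | h
      · split at h <;> simp_all
      · have := ih R (s + 1) (by omega) j h; omega

theorem pvDiffs_eq_nil_of_eq (L : List Char) (s : Int) : pvDiffs L L s = [] := by
  induction L generalizing s with
  | nil => simp [pvDiffs_nil]
  | cons a L ih => rw [pvDiffs_cons]; simp [ih]

theorem pvEq_of_diffs_nil (L R : List Char) (s : Int)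
    (hlen : L.length = R.length) (h : pvDiffs L R s = []) : L = R := by
  induction L generalizing R s with
  | nil => cases R <;> simp_all
  | cons a L ih =>
    cases R with
    | nil => simp at hlen
    | cons b R =>
      rw [pvDiffs_cons] at h
      have hab : a = b := by by_cases hab : a = b <;> simp_all
      have := ih R (s + 1) (by simpa using hlen) (by simp_all)
      simp_all


def pvAMatch (L R : List Char) (D : List Int) : Bool :=
  match D with
  | [first, second] =>
      decide (second = first + 1)
        && (PySem.List.pyGet? L first == PySem.List.pyGet? R second)
        && (PySem.List.pyGet? L second == PySem.List.pyGet? R first)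
  | _ => false

theorem pvCoreA_eq_match (L R : List Char) : pvCoreA L R = pvAMatch L R (pvDiffs L R 0) := rfl

theorem pvDiffs_succ (L R : List Char) (s : Int) :
    pvDiffs L R (s + 1) = (pvDiffs L R s).map (· + 1) := by
  induction L generalizing R s with
  | nil => simp [pvDiffs_nil]
  | cons a L ih =>
    cases R with
    | nil => simp [pvDiffs_nil']
    | cons b R =>
      rw [pvDiffs_cons, pvDiffs_cons, ih]
      by_cases hab : a = b <;> simp [hab]

theorem pvGet_cons (c : Char) (xs : List Char) (i : Int) (h : 0 ≤ i) :
    PySem.List.pyGet? (c :: xs) (i + 1) = PySem.List.pyGet? xs i := by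
  rw [PySem.List.pyGet?_of_nonneg (c :: xs) (show (0:Int) ≤ i + 1 by omega),
      PySem.List.pyGet?_of_nonneg xs h]
  have ht : (i + 1).toNat = i.toNat + 1 := by omega
  simp [ht]

-- main bridge: on equal-length lists the two cores agree
theorem pvCore_eq (L R : List Char) (hlen : L.length = R.length) :
    pvCoreA L R = pvScanB L R := by
  induction L generalizing R with
  | nil => cases R <;> simp_all [pvCoreA, pvScanB, PySem.List.enumerate_nil]
  | cons a L ih =>
    cases R with
    | nil => simp at hlen
    | cons b R =>
      have hlen' : L.length = R.length := by simpa using hlen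
      rw [pvCoreA_eq_match, pvDiffs_cons]
      have hsucc : pvDiffs L R (0 + 1) = (pvDiffs L R 0).map (· + 1) := by
        rw [pvDiffs_succ]
      by_cases hab : a = b
      · -- heads agree: both sides reduce to the tails
        subst hab
        rw [if_neg (by simp), hsucc]
        cases L with
        | nil =>
          cases R with
          | nil => simp [pvDiffs_nil, pvAMatch, pvScanB]
          | cons b2 bs' => simp at hlen'
        | cons a2 as' =>
          cases R with
          | nil => simp at hlen'
          | cons b2 bs' =>
            have hscan : pvScanB (a :: a2 :: as') (a :: b2 :: bs') = pvScanB (a2 :: as') (b2 :: bs') := by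
              simp [pvScanB]
            rw [hscan, ← ih _ hlen', pvCoreA_eq_match]
            rcases hD : pvDiffs (a2 :: as') (b2 :: bs') 0 with _ | ⟨x, _ | ⟨y, _ | ⟨z, t⟩⟩⟩
            · simp [pvAMatch]
            · simp [pvAMatch]
            · have hx : 0 ≤ x := pvDiffs_nonneg _ _ 0 le_rfl x (by rw [hD]; simp)
              have hy : 0 ≤ y := pvDiffs_nonneg _ _ 0 le_rfl y (by rw [hD]; simp)
              simp only [List.map_cons, List.map_nil, List.nil_append, pvAMatch]
              rw [pvGet_cons _ _ x hx, pvGet_cons _ _ y hy, pvGet_cons _ _ x hx, pvGet_cons _ _ y hy]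
              have hdec : decide (y + 1 = x + 1 + 1) = decide (y = x + 1) :=
                decide_eq_decide.mpr (by omega)
              rw [hdec]
            · simp [pvAMatch]
      · -- heads differ: A needs exactly [0, 1]; B checks the swap and the tails
        rw [if_pos (by simpa using hab), hsucc]
        cases L with
        | nil =>
          cases R with
          | nil => simp [pvDiffs_nil, pvAMatch, pvScanB]
          | cons b2 bs' => simp at hlen'
        | cons a2 as' =>
          cases R with
          | nil => simp at hlen'
          | cons b2 bs' =>
            have hlen'' : as'.length = bs'.length := by simpa using hlen'
            simp only [pvScanB, List.tail_cons]
            rw [if_pos hab]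
            rcases hD : pvDiffs (a2 :: as') (b2 :: bs') 0 with _ | ⟨x, _ | ⟨y, t⟩⟩
            · -- tails identical: A sees one difference → false; B's swap check is contradictory
              have heq : (a2 :: as') = (b2 :: bs') := pvEq_of_diffs_nil _ _ 0 hlen' hD
              have h1 : a2 = b2 := by injection heq
              have h2 : as' = bs' := by injection heq
              subst h1; subst h2
              simp only [List.map_nil, List.append_nil, pvAMatch]
              by_cases e1 : a = a2 <;> by_cases e2 : a2 = b <;> simp_all
            · -- exactly one difference in the tails at x
              have hx : 0 ≤ x := pvDiffs_nonneg _ _ 0 le_rfl x (by rw [hD]; simp)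
              by_cases hx0 : x = 0
              · subst hx0
                -- differences of the tails = [0] ⇒ a2 ≠ b2 and as' = bs'
                rw [pvDiffs_cons, pvDiffs_succ] at hD
                have htails : as' = bs' := by
                  by_cases h2 : a2 = b2
                  · exfalso
                    rw [if_neg (by simp [h2])] at hD
                    simp only [List.nil_append] at hD
                    rcases hE : pvDiffs as' bs' 0 with _ | ⟨k, u⟩
                    · rw [hE] at hD; simp at hD
                    · have hk : 0 ≤ k := pvDiffs_nonneg _ _ 0 le_rfl k (by rw [hE]; simp)
                      rw [hE] at hD
                      simp at hD
                      omega
                  · rw [if_pos (by simpa using h2)] at hD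
                    simp only [List.singleton_append, List.cons.injEq] at hD
                    exact pvEq_of_diffs_nil _ _ 0 hlen'' (by simpa using hD.2)
                simp only [List.map_cons, List.map_nil, List.singleton_append, pvAMatch]
                have g1 : PySem.List.pyGet? (a :: a2 :: as') (0 : Int) = some a := by
                  simp [PySem.List.pyGet?_zero_cons]
                have g2 : PySem.List.pyGet? (b :: b2 :: bs') ((0 : Int) + 1) = some b2 := by
                  rw [pvGet_cons _ _ 0 le_rfl]; simp
                have g3 : PySem.List.pyGet? (a :: a2 :: as') ((0 : Int) + 1) = some a2 := by
                  rw [pvGet_cons _ _ 0 le_rfl]; simp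
                have g4 : PySem.List.pyGet? (b :: b2 :: bs') (0 : Int) = some b := by
                  simp [PySem.List.pyGet?_zero_cons]
                rw [g1, g2, g3, g4]
                simp [htails]
              · -- x ≥ 1: A's indices are not adjacent; B's tails differ
                have hne : as' ≠ bs' := by
                  intro he
                  have hE : pvDiffs as' bs' 0 = [] := he ▸ pvDiffs_eq_nil_of_eq as' 0
                  rw [pvDiffs_cons, pvDiffs_succ, hE] at hD
                  by_cases h2 : a2 = b2
                  · rw [if_neg (by simp [h2])] at hD; simp at hD
                  · rw [if_pos (by simpa using h2)] at hD
                    simp at hD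
                    omega
                simp only [List.map_cons, List.map_nil, List.singleton_append, pvAMatch]
                have hd : decide (x + 1 = (0 : Int) + 1) = false := by
                  simp; omega
                rw [hd]
                simp [hne]
            · -- three or more differences: both sides false
              have hne : as' ≠ bs' := by
                intro he
                have hE : pvDiffs as' bs' 0 = [] := he ▸ pvDiffs_eq_nil_of_eq as' 0
                rw [pvDiffs_cons, pvDiffs_succ, hE] at hD
                by_cases h2 : a2 = b2
                · rw [if_neg (by simp [h2])] at hD; simp at hD
                · rw [if_pos (by simpa using h2)] at hD; simp at hD
              simp [pvAMatch, hne]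

theorem is_single_transposition_py_spec : Claim_equal_is_single_transposition_py := by
  intro left right _
  unfold Spec_is_single_transposition_py is_single_transposition_py is_single_transposition_py_alt
  dsimp only
  by_cases h : left.toList.length ≠ right.toList.length ∨ left.toList.length < 2
  · rw [if_pos h, if_pos h]
  · rw [if_neg h, if_neg h]
    exact pvCore_eq _ _ (by by_contra hne; exact h (Or.inl hne))
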